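-- pv_equiv track=rewrite | github.com/KarlJohnsonnn/MeteoDataComparison | NetCDF_Tool.py | get_time_boundary
-- ===== SOURCE A (Python) =====
-- def get_time_boundary(Array, t_int):
--     i = 0
--     t_min = 0
--     t_max = -1
--     for zeit in Array:
--         if t_int[0] <= zeit <= t_int[1]: t_min = i
--         if t_int[2] <= zeit <= t_int[3]: t_max = i
--         i += 1
--
--     return t_min, t_max
-- ===== SOURCE B (Python) =====
-- def get_time_boundary(Array, t_int):
--     arr = list(Array)
--     t_min = 0
--     for i in range(len(arr) - 1, -1, -1):
--         if t_int[0] <= arr[i] <= t_int[1]: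
--             t_min = i
--             break
--     t_max = -1
--     for i in range(len(arr) - 1, -1, -1):
--         if t_int[2] <= arr[i] <= t_int[3]:
--             t_max = i
--             break
--     return t_min, t_max
-- ===== Notes on version B (the rewrite author's own statement) =====
-- stated objective: alternative
-- what changed: Replaces the single forward accumulate-overwrite pass with two reverse early-exit scans that each stop at the first (i.e. last) matching index.
import Mathlib
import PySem

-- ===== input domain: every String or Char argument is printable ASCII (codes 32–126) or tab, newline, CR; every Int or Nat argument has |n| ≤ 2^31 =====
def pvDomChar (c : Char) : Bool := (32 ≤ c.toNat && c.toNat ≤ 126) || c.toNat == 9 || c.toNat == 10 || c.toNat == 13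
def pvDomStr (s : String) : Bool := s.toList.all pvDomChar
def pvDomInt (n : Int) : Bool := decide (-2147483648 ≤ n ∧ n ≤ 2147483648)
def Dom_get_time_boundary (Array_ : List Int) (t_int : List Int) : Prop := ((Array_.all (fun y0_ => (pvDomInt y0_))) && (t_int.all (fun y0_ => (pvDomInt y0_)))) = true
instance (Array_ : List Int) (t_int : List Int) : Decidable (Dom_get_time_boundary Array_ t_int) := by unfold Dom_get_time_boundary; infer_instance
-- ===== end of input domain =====

-- B replaces A's single forward accumulate-overwrite pass with two reverse early-exit
-- scans (same O(n) cost, different decomposition); return values proved equal on Pre_.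


-- ===== PORT A =====
-- A: one forward pass carrying (i, t_min, t_max); t_int[k] raises IndexError when
-- t_int is too short and Array_ is nonempty — those inputs are excluded by Pre_,
-- so the .getD 0 default is never reached on admitted inputs.
def get_time_boundary (Array_ : List Int) (t_int : List Int) : Int × Int :=
  let r := Array_.foldl (fun (st : Int × Int × Int) zeit =>
    let i := st.1
    let t_min := if (PySem.List.pyGet? t_int 0).getD 0 ≤ zeit ∧ zeit ≤ (PySem.List.pyGet? t_int 1).getD 0 then i else st.2.1
    let t_max := if (PySem.List.pyGet? t_int 2).getD 0 ≤ zeit ∧ zeit ≤ (PySem.List.pyGet? t_int 3).getD 0 then i else st.2.2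
    (i + 1, t_min, t_max)) (0, 0, -1)
  (r.2.1, r.2.2)

-- ===== PORT B =====
-- pvEnum k arr = the (index, value) pairs of arr, indices starting at k.
def pvEnum (k : Int) : List Int → List (Int × Int)
  | [] => []
  | v :: rest => (k, v) :: pvEnum (k + 1) rest

-- pvScanRev pairs lo hi d: Source B's reverse early-exit loop — first pair (i, v) with
-- lo ≤ v ≤ hi gives i ("break"), otherwise the default d.
def pvScanRev (pairs : List (Int × Int)) (lo hi d : Int) : Int :=
  match pairs with
  | [] => d
  | (i, v) :: rest => if lo ≤ v ∧ v ≤ hi then i else pvScanRev rest lo hi d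

def get_time_boundary_alt (Array_ : List Int) (t_int : List Int) : Int × Int :=
  let pairs := (pvEnum 0 Array_).reverse
  let t_min := pvScanRev pairs ((PySem.List.pyGet? t_int 0).getD 0) ((PySem.List.pyGet? t_int 1).getD 0) 0
  let t_max := pvScanRev pairs ((PySem.List.pyGet? t_int 2).getD 0) ((PySem.List.pyGet? t_int 3).getD 0) (-1)
  (t_min, t_max)

-- ===== PRECONDITION & SPEC =====
-- Pre_ excludes exactly the inputs where Python A raises IndexError: a nonempty
-- Array_ with t_int shorter than 4, except that (by chained-comparison
-- short-circuiting) a length-3 t_int still returns when no element reaches t_int[2].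
def Pre_get_time_boundary (Array_ : List Int) (t_int : List Int) : Prop :=
  Array_ = [] ∨ 4 ≤ t_int.length ∨ (t_int.length = 3 ∧ ∀ z ∈ Array_, z < t_int.getD 2 0)
instance (Array_ : List Int) (t_int : List Int) : Decidable (Pre_get_time_boundary Array_ t_int) := by unfold Pre_get_time_boundary; infer_instance
def pvWitness_get_time_boundary : List Int × List Int := ([3, 7, 5, 9], [4, 8, 6, 10])

def Spec_get_time_boundary (Array_ : List Int) (t_int : List Int) (out : Int × Int) : Prop := out = get_time_boundary_alt Array_ t_int
instance (Array_ : List Int) (t_int : List Int) (out : Int × Int) : Decidable (Spec_get_time_boundary Array_ t_int out) := by unfold Spec_get_time_boundary; infer_instance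

-- ===== CLAIM (what is proved, stated in full; the proofs are below) =====
def Claim_equal_get_time_boundary : Prop := ∀ (Array_ : List Int) (t_int : List Int), Dom_get_time_boundary Array_ t_int → Pre_get_time_boundary Array_ t_int → Spec_get_time_boundary Array_ t_int (get_time_boundary Array_ t_int)

-- ===== LEMMAS AND PROOFS =====

-- Common characterisation: last index (counting from k) whose value lies in [lo, hi], else d.
def lastIdx (xs : List Int) (k lo hi d : Int) : Int :=
  match xs with
  | [] => d
  | v :: rest => lastIdx rest (k + 1) lo hi (if lo ≤ v ∧ v ≤ hi then k else d)

theorem foldlA_eq_lastIdx (a b c d : Int) :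
    ∀ (xs : List Int) (k m x : Int),
      xs.foldl (fun (st : Int × Int × Int) zeit =>
        let i := st.1
        let t_min := if a ≤ zeit ∧ zeit ≤ b then i else st.2.1
        let t_max := if c ≤ zeit ∧ zeit ≤ d then i else st.2.2
        (i + 1, t_min, t_max)) (k, m, x)
      = (k + xs.length, lastIdx xs k a b m, lastIdx xs k c d x) := by
  intro xs
  induction xs with
  | nil => intro k m x; simp [lastIdx]
  | cons v rest ih =>
      intro k m x
      simp only [List.foldl_cons, lastIdx, ih, List.length_cons]
      congr 1
      push_cast; ring

theorem scanRev_append (xs : List (Int × Int)) (i v lo hi d : Int) :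
    pvScanRev (xs ++ [(i, v)]) lo hi d
      = pvScanRev xs lo hi (if lo ≤ v ∧ v ≤ hi then i else d) := by
  induction xs with
  | nil => simp [pvScanRev]
  | cons p rest ih =>
      obtain ⟨j, w⟩ := p
      simp [pvScanRev, ih]

theorem scanRev_reverse_enum (lo hi : Int) :
    ∀ (xs : List Int) (k d : Int),
      pvScanRev (pvEnum k xs).reverse lo hi d = lastIdx xs k lo hi d := by
  intro xs
  induction xs with
  | nil => intro k d; simp [pvEnum, pvScanRev, lastIdx]
  | cons v rest ih =>
      intro k d
      simp only [pvEnum, List.reverse_cons, lastIdx]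
      rw [scanRev_append, ih]

-- ===== VERDICT (by name: the statement is the Claim_ definition above) =====
theorem get_time_boundary_spec : Claim_equal_get_time_boundary := by
  intro Array_ t_int _ _
  unfold Spec_get_time_boundary get_time_boundary get_time_boundary_alt
  rw [foldlA_eq_lastIdx]
  simp only [scanRev_reverse_enum]
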